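-- pv_equiv track=rewrite | github.com/bica-tools/reticulate | reticulate/petri.py | _check_free_choice
-- ===== SOURCE A (Python) =====
-- def _check_free_choice(pre: dict[int, set[tuple[int, int]]]) -> bool:
--     """Check the free-choice property.
--
--     A net is free-choice iff for every two transitions t1, t2:
--     if they share an input place, they have the same set of input places.
--     """
--     # Group transitions by their input places
--     place_to_transitions: dict[int, list[int]] = {}
--     for tid, inputs in pre.items():
--         for pid, _ in inputs:
--             place_to_transitions.setdefault(pid, []).append(tid)
--
--     # For each group sharing a place, check pre-sets are identical
--     for _, tids in place_to_transitions.items():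
--         if len(tids) <= 1:
--             continue
--         first_pre = pre[tids[0]]
--         for tid in tids[1:]:
--             if pre[tid] != first_pre:
--                 return False
--     return True
-- ===== SOURCE B (Python) =====
-- def _check_free_choice(pre: dict[int, set[tuple[int, int]]]) -> bool:
--     """Check the free-choice property by scanning all unordered pairs of presets."""
--     presets = list(pre.values())
--     for i, a in enumerate(presets):
--         for b in presets[i + 1:]:
--             if a != b and any(p == q for p, _ in a for q, _ in b):
--                 return False
--     return True
-- ===== Notes on version B (the rewrite author's own statement) =====
-- stated objective: simpler
-- what changed: B drops the place-to-transitions index and directly scans all unordered pairs of presets, failing when two presets that share a place id are unequal as sets; Pre_ requires distinct transition ids (every Python dict satisfies this; only the assoc-list encoding can express duplicate keys, on which A's first-match lookups are accidental).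
import Mathlib
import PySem

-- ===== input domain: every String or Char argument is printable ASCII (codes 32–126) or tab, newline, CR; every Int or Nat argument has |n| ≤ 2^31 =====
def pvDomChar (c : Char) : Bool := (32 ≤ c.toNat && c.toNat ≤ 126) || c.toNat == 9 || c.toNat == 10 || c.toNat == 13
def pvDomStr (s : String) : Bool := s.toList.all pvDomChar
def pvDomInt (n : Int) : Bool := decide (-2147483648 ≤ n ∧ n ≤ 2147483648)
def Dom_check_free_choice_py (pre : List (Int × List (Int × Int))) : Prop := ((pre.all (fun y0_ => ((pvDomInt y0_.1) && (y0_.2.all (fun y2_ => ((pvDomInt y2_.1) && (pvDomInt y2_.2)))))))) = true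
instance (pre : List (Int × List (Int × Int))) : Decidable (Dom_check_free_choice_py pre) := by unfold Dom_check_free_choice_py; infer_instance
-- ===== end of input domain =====

-- B replaces A's place→transitions index by a direct scan over all unordered pairs of presets (simpler decomposition, same result).


-- ===== PORT A =====
-- place_to_transitions.setdefault(pid, []).append(tid)  ==  modify pid [] (· ++ [tid])
def pvGroupA (pre : List (Int × List (Int × Int))) : PySem.Dict Int (List Int) :=
  pre.foldl (fun d ts => ts.2.foldl (fun d p => d.modify p.1 [] (fun l => l ++ [ts.1])) d)
    PySem.Dict.empty

-- pre[tid]; the KeyError case is unreachable (every tid in the index is a key of pre), getD only makes it total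
def pvLookupA (pre : List (Int × List (Int × Int))) (t : Int) : List (Int × Int) :=
  PySem.Dict.getD ⟨pre⟩ t []

def check_free_choice_py (pre : List (Int × List (Int × Int))) : Bool :=
  (pvGroupA pre).items.all (fun g =>
    if g.2.length ≤ 1 then true
    else
      match g.2 with
      | [] => true
      | t0 :: rest =>
        -- Python's set inequality pre[tid] != first_pre  ==  !Set.equal; early 'return False' == all
        rest.all (fun t => PySem.Set.equal (pvLookupA pre t) (pvLookupA pre t0)))

-- ===== PORT B =====
-- any(p == q for p, _ in a for q, _ in b)
def pvShares (a b : List (Int × Int)) : Bool :=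
  a.any (fun p => b.any (fun q => p.1 == q.1))

-- for i, a in enumerate(presets): for b in presets[i+1:]: if a != b and shares: return False
def pvAltGo : List (List (Int × Int)) → Bool
  | [] => true
  | a :: rest =>
      rest.all (fun b => PySem.Set.equal a b || !pvShares a b) && pvAltGo rest

def check_free_choice_py_alt (pre : List (Int × List (Int × Int))) : Bool :=
  pvAltGo (pre.map Prod.snd)

-- ===== PRECONDITION & SPEC =====
-- Pre_ requires distinct transition ids: every Python dict has distinct keys, so no dict input is
-- excluded; only the assoc-list ENCODING can carry duplicate keys, where A's first-match lookups
-- make its value accidental.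
def Pre_check_free_choice_py (pre : List (Int × List (Int × Int))) : Prop :=
  (pre.map Prod.fst).Nodup
instance (pre : List (Int × List (Int × Int))) : Decidable (Pre_check_free_choice_py pre) := by
  unfold Pre_check_free_choice_py; infer_instance

def pvWitness_check_free_choice_py : (List (Int × List (Int × Int))) :=
  [(0, [(1, 2)]), (3, [(1, 2)])]

def Spec_check_free_choice_py (pre : List (Int × List (Int × Int))) (out : Bool) : Prop :=
  out = check_free_choice_py_alt pre
instance (pre : List (Int × List (Int × Int))) (out : Bool) :
    Decidable (Spec_check_free_choice_py pre out) := by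
  unfold Spec_check_free_choice_py; infer_instance

-- ===== CLAIM (what is proved, stated in full; the proofs are below) =====
def Claim_equal_check_free_choice_py : Prop :=
  ∀ (pre : List (Int × List (Int × Int))), Dom_check_free_choice_py pre →
    Pre_check_free_choice_py pre →
    Spec_check_free_choice_py pre (check_free_choice_py pre)

-- ===== LEMMAS AND PROOFS =====

-- the flattened (place, transition) incidence list
def pvPairsL (pre : List (Int × List (Int × Int))) : List (Int × Int) :=
  pre.flatMap (fun ts => ts.2.map (fun p => (p.1, ts.1)))

-- the common pairwise specification both programs decide
def pvQ (pre : List (Int × List (Int × Int))) : Prop :=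
  ∀ a ∈ pre.map Prod.snd, ∀ b ∈ pre.map Prod.snd,
    pvShares a b = true → PySem.Set.equal a b = true

theorem pvEqual_refl (a : List (Int × Int)) : PySem.Set.equal a a = true := by
  rw [PySem.Set.equal_iff]; intro x; rfl

theorem pvEqual_symm {a b : List (Int × Int)} (h : PySem.Set.equal a b = true) :
    PySem.Set.equal b a = true := by
  rw [PySem.Set.equal_iff] at *; intro x; exact (h x).symm

theorem pvEqual_trans {a b c : List (Int × Int)} (h1 : PySem.Set.equal a b = true)
    (h2 : PySem.Set.equal b c = true) : PySem.Set.equal a c = true := by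
  rw [PySem.Set.equal_iff] at *; intro x; exact (h1 x).trans (h2 x)

theorem pvShares_symm {a b : List (Int × Int)} (h : pvShares a b = true) :
    pvShares b a = true := by
  unfold pvShares at *
  rw [List.any_eq_true] at *
  obtain ⟨p, hp, hin⟩ := h
  rw [List.any_eq_true] at hin
  obtain ⟨q, hq, e⟩ := hin
  refine ⟨q, hq, ?_⟩
  rw [List.any_eq_true]
  exact ⟨p, hp, by simp at e ⊢; omega⟩

theorem pvLookup_eq (pre : List (Int × List (Int × Int))) (hnd : (pre.map Prod.fst).Nodup)
    {t : Int} {s : List (Int × Int)} (h : (t, s) ∈ pre) : pvLookupA pre t = s :=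
  PySem.Dict.getD_of_mem_items ⟨pre⟩ h hnd []

theorem pvGroupA_aux (pre : List (Int × List (Int × Int))) :
    ∀ (d : PySem.Dict Int (List Int)),
    pre.foldl (fun d ts => ts.2.foldl (fun d p => d.modify p.1 [] (fun l => l ++ [ts.1])) d) d
      = (pvPairsL pre).foldl (fun d q => d.modify q.1 [] (fun l => l ++ [q.2])) d := by
  induction pre with
  | nil => intro d; simp [pvPairsL]
  | cons ts rest ih =>
    intro d
    simp only [List.foldl_cons, pvPairsL, List.flatMap_cons, List.foldl_append, ih]
    rw [List.foldl_map]

theorem pvGroupA_eq (pre : List (Int × List (Int × Int))) :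
    pvGroupA pre = (pvPairsL pre).foldl
      (fun d q => d.modify q.1 [] (fun l => l ++ [q.2])) PySem.Dict.empty :=
  pvGroupA_aux pre _

theorem pvGroup_nodup (pre : List (Int × List (Int × Int))) : (pvGroupA pre).keys.Nodup := by
  rw [pvGroupA_eq]
  exact PySem.Dict.nodup_keys_foldl_modify_key (pvPairsL pre) (fun q => q.1) []
    (fun _ q l => l ++ [q.2]) PySem.Dict.empty PySem.Dict.nodup_keys_empty

theorem pvGroup_mem_items (pre : List (Int × List (Int × Int))) {c t : Int}
    (h : t ∈ (pvGroupA pre).getD c []) :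
    (c, (pvGroupA pre).getD c []) ∈ (pvGroupA pre).items := by
  rcases hg : (pvGroupA pre).get? c with _ | v
  · rw [PySem.Dict.getD_eq_get?_getD, hg] at h; simp at h
  · have := PySem.Dict.mem_items_of_get?_eq_some _ hg
    rwa [PySem.Dict.getD_eq_get?_getD, hg]

theorem pvGroup_items_getD (pre : List (Int × List (Int × Int))) {c : Int} {tids : List Int}
    (h : (c, tids) ∈ (pvGroupA pre).items) : (pvGroupA pre).getD c [] = tids := by
  have := PySem.Dict.get?_of_mem_items _ h (pvGroup_nodup pre)
  rw [PySem.Dict.getD_eq_get?_getD, this]; rfl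

theorem pvMem_group (pre : List (Int × List (Int × Int))) (c t : Int) :
    t ∈ (pvGroupA pre).getD c [] ↔ (c, t) ∈ pvPairsL pre := by
  rw [pvGroupA_eq, PySem.Dict.getD_foldl_modify_append]
  simp only [PySem.Dict.getD_empty, List.nil_append, List.mem_map, List.mem_filter]
  constructor
  · rintro ⟨q, ⟨hq, hc⟩, ht⟩
    have : q = (c, t) := by
      obtain ⟨q1, q2⟩ := q
      simp at hc ht
      simp [hc, ht]
    exact this ▸ hq
  · intro h
    exact ⟨(c, t), ⟨h, by simp⟩, rfl⟩

theorem pvMem_pairsL (pre : List (Int × List (Int × Int))) (c t : Int) :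
    (c, t) ∈ pvPairsL pre ↔ ∃ s, (t, s) ∈ pre ∧ ∃ p ∈ s, p.1 = c := by
  simp only [pvPairsL, List.mem_flatMap, List.mem_map]
  constructor
  · rintro ⟨ts, hts, p, hp, he⟩
    have e1 : p.1 = c := congrArg Prod.fst he
    have e2 : ts.1 = t := congrArg Prod.snd he
    exact ⟨ts.2, by rw [← e2]; exact hts, p, hp, e1⟩
  · rintro ⟨s, hs, p, hp, he⟩
    exact ⟨(t, s), hs, p, hp, by simp [he]⟩

theorem pvAltGo_iff (l : List (List (Int × Int))) :
    pvAltGo l = true ↔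
      ∀ a ∈ l, ∀ b ∈ l, pvShares a b = true → PySem.Set.equal a b = true := by
  induction l with
  | nil => simp [pvAltGo]
  | cons a rest ih =>
    rw [pvAltGo, Bool.and_eq_true, List.all_eq_true, ih]
    constructor
    · rintro ⟨hall, hrest⟩ x hx y hy hsh
      have key : ∀ z ∈ rest, pvShares a z = true → PySem.Set.equal a z = true := by
        intro z hz hs
        have := hall z hz
        rw [Bool.or_eq_true] at this
        rcases this with h | h
        · exact h
        · rw [Bool.not_eq_true', hs] at h; cases h
      rcases List.mem_cons.mp hx with hxa | hx'
      · rcases List.mem_cons.mp hy with hya | hy'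
        · subst hxa; subst hya; exact pvEqual_refl _
        · subst hxa; exact key y hy' hsh
      · rcases List.mem_cons.mp hy with hya | hy'
        · subst hya; exact pvEqual_symm (key x hx' (pvShares_symm hsh))
        · exact hrest x hx' y hy' hsh
    · intro h
      refine ⟨?_, fun x hx y hy => h x (List.mem_cons_of_mem _ hx) y (List.mem_cons_of_mem _ hy)⟩
      intro b hb
      rw [Bool.or_eq_true]
      by_cases hs : pvShares a b = true
      · exact Or.inl (h a (List.mem_cons_self ..) b (List.mem_cons_of_mem _ hb) hs)
      · exact Or.inr (by simpa using hs)

theorem pvB_iff (pre : List (Int × List (Int × Int))) :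
    check_free_choice_py_alt pre = true ↔ pvQ pre := by
  rw [check_free_choice_py_alt, pvAltGo_iff]; rfl

theorem pvA_iff (pre : List (Int × List (Int × Int)))
    (hnd : (pre.map Prod.fst).Nodup) :
    check_free_choice_py pre = true ↔ pvQ pre := by
  rw [check_free_choice_py, List.all_eq_true]
  constructor
  · -- A → Q
    intro hA a ha b hb hsh
    rw [List.mem_map] at ha hb
    obtain ⟨⟨t1, a'⟩, h1, e1⟩ := ha
    obtain ⟨⟨t2, b'⟩, h2, e2⟩ := hb
    cases e1; cases e2
    rw [pvShares, List.any_eq_true] at hsh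
    obtain ⟨p, hp, hq⟩ := hsh
    rw [List.any_eq_true] at hq
    obtain ⟨q, hq, epq⟩ := hq
    have epq : p.1 = q.1 := by simpa using epq
    set c := p.1 with hc
    have m1 : t1 ∈ (pvGroupA pre).getD c [] := by
      rw [pvMem_group, pvMem_pairsL]; exact ⟨a', h1, p, hp, rfl⟩
    have m2 : t2 ∈ (pvGroupA pre).getD c [] := by
      rw [pvMem_group, pvMem_pairsL]; exact ⟨b', h2, q, hq, epq.symm⟩
    by_cases ht : t1 = t2
    · subst ht
      have : a' = b' := by
        rw [← pvLookup_eq pre hnd h1, ← pvLookup_eq pre hnd h2]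
      exact this ▸ pvEqual_refl a'
    · have hitem := pvGroup_mem_items pre m1
      have hpred := hA _ hitem
      have hlen : ¬ ((pvGroupA pre).getD c []).length ≤ 1 := by
        rcases hG : (pvGroupA pre).getD c [] with _ | ⟨x, ⟨⟩ | ⟨y, xs⟩⟩
        · rw [hG] at m1; cases m1
        · rw [hG] at m1 m2
          simp at m1 m2; exact absurd (m1.trans m2.symm) ht
        · simp
      simp only [hlen, if_false] at hpred
      rcases hG : (pvGroupA pre).getD c [] with _ | ⟨t0, rest⟩
      · rw [hG] at m1; cases m1
      · rw [hG] at hpred m1 m2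
        have hall : ∀ t ∈ t0 :: rest, PySem.Set.equal (pvLookupA pre t) (pvLookupA pre t0) = true := by
          intro t htm
          rcases List.mem_cons.mp htm with h0 | hr
          · subst h0; exact pvEqual_refl _
          · rw [List.all_eq_true] at hpred; exact hpred t hr
        have e1 := hall t1 m1
        have e2 := hall t2 m2
        have : PySem.Set.equal (pvLookupA pre t1) (pvLookupA pre t2) = true :=
          pvEqual_trans e1 (pvEqual_symm e2)
        rwa [pvLookup_eq pre hnd h1, pvLookup_eq pre hnd h2] at this
  · -- Q → A
    intro hQ g hg
    obtain ⟨c, tids⟩ := g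
    split
    · rfl
    · cases tids with
      | nil => rfl
      | cons t0 rest =>
        change (rest.all fun t =>
          PySem.Set.equal (pvLookupA pre t) (pvLookupA pre t0)) = true
        rw [List.all_eq_true]
        intro t htr
        have hgd := pvGroup_items_getD pre hg
        have hm : ∀ u ∈ t0 :: rest, ∃ s, (u, s) ∈ pre ∧ ∃ p ∈ s, p.1 = c := by
          intro u hu
          rw [← pvMem_pairsL, ← pvMem_group, hgd]
          exact hu
        obtain ⟨s0, hs0, p0, hp0, hc0⟩ := hm t0 (List.mem_cons_self ..)
        obtain ⟨st, hst, pt, hpt, hct⟩ := hm t (List.mem_cons_of_mem _ htr)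
        have hsh : pvShares st s0 = true := by
          rw [pvShares, List.any_eq_true]
          refine ⟨pt, hpt, ?_⟩
          rw [List.any_eq_true]
          exact ⟨p0, hp0, by simp [hct, hc0]⟩
        have := hQ st (List.mem_map.mpr ⟨(t, st), hst, rfl⟩)
          s0 (List.mem_map.mpr ⟨(t0, s0), hs0, rfl⟩) hsh
        rwa [pvLookup_eq pre hnd hst, pvLookup_eq pre hnd hs0]

-- ===== VERDICT (by name: the statement is the Claim_ definition above) =====
theorem check_free_choice_py_spec : Claim_equal_check_free_choice_py := by
  intro pre _ hpre
  unfold Spec_check_free_choice_py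
  have h := (pvA_iff pre hpre).trans (pvB_iff pre).symm
  cases hA : check_free_choice_py pre <;> cases hB : check_free_choice_py_alt pre <;>
    simp_all
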